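-- pv_equiv track=rewrite | github.com/tmorris1/CPE101Lab1 | music_catalog.py | check_line_valid
-- ===== SOURCE A (Python) =====
-- def check_line_valid(line):
--    pairs = 0
--    for index in range(0, len(line)):
--       if (index != 0) and (line[index] == "-") and (index + 2 < len(line)) and  (line[index + 1] == "-") \
--             and (line[index + 2] != "-") and line[index - 1] != "-":
--          pairs += 1
--    if pairs == 2:
--       return True
--    else:
--       return False
-- ===== SOURCE B (Python) =====
-- def check_line_valid(line):
--     count = 0
--     run = 0            # length of the current run of '-' characters
--     seen_nondash = False   # a non-dash character occurred before the current run
--     for ch in line: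
--         if ch == '-':
--             run += 1
--         else:
--             if run == 2 and seen_nondash:
--                 count += 1
--             run = 0
--             seen_nondash = True
--     return count == 2
-- ===== Notes on version B (the rewrite author's own statement) =====
-- stated objective: simpler
-- what changed: Replaces the index loop with its six-way guarded window test by a single character-level state machine that tracks the length of the current dash run and whether a non-dash character preceded it, counting interior maximal runs of exactly two dashes.
import Mathlib
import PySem

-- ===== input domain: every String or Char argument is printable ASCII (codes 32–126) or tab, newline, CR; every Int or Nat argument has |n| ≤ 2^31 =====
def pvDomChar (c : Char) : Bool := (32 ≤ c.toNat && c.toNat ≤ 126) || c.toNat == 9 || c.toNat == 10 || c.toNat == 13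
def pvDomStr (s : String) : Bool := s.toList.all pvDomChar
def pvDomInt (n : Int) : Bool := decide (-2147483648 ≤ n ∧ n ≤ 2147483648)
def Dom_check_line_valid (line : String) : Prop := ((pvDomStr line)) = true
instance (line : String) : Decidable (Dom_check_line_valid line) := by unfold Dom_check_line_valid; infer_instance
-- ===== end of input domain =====

-- B replaces A's index-window loop by a one-pass run-length state machine (simpler: no index arithmetic); return value only, no mutation involved.

-- ===== PORT A =====
-- literal transliteration of A: fold over range(0, len(line)) counting indices whose window matches
def check_line_valid (line : String) : Bool :=
  let cs := line.toList
  let n : Int := (cs.length : Int)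
  let pairs : Int := (PySem.List.pyRange 0 n 1).foldl (fun pairs index =>
    if index ≠ 0 ∧ PySem.List.pyGet? cs index = some '-' ∧ index + 2 < n ∧
       PySem.List.pyGet? cs (index + 1) = some '-' ∧
       ¬ (PySem.List.pyGet? cs (index + 2) = some '-') ∧
       ¬ (PySem.List.pyGet? cs (index - 1) = some '-')
    then pairs + 1 else pairs) 0
  if pairs = 2 then true else false

-- ===== PORT B =====
-- literal transliteration of B: single fold over the characters with state (count, run, seen_nondash)
def check_line_valid_alt (line : String) : Bool :=
  let st := line.toList.foldl (fun (st : Int × Int × Bool) ch =>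
    let (count, run, seen) := st
    if ch == '-' then (count, run + 1, seen)
    else ((if run == 2 && seen then count + 1 else count), 0, true)) (0, 0, false)
  st.1 == 2

-- ===== PRECONDITION & SPEC =====
def Spec_check_line_valid (line : String) (out : Bool) : Prop := out = check_line_valid_alt line
instance (line : String) (out : Bool) : Decidable (Spec_check_line_valid line out) := by unfold Spec_check_line_valid; infer_instance

-- ===== CLAIM (what is proved, stated in full; the proofs are below) =====
def Claim_equal_check_line_valid : Prop := ∀ (line : String), Dom_check_line_valid line → Spec_check_line_valid line (check_line_valid line)

-- ===== LEMMAS AND PROOFS =====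

-- common reference count: matches of the pattern (non-dash) '-' '-' (non-dash), given whether the previous char exists and is not '-'
def pvMhead : List Char → Bool
  | a :: d :: _ => a == '-' && d != '-'
  | _ => false

def pvCnt (prev : Bool) : List Char → Int
  | [] => 0
  | c :: cs => (if prev && (c == '-') && pvMhead cs then 1 else 0) + pvCnt (c != '-') cs

-- A's per-index condition as a Nat-indexed boolean, with explicit previous-char information
def pvQ (prev : Bool) (cs : List Char) (k : Nat) : Bool :=
  (if k = 0 then prev else decide (cs.getD (k - 1) ' ' ≠ '-')) &&
  decide (cs.getD k ' ' = '-') && decide (k + 2 < cs.length) &&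
  decide (cs.getD (k + 1) ' ' = '-') && decide (cs.getD (k + 2) ' ' ≠ '-')

-- B's state machine semantics
def pvF : Int → Bool → List Char → Int
  | _, _, [] => 0
  | run, seen, c :: cs =>
    if c == '-' then pvF (run + 1) seen cs
    else (if run == 2 && seen then 1 else 0) + pvF 0 true cs

lemma pvFoldCount (P : Int → Prop) [DecidablePred P] :
    ∀ (l : List Int) (init : Int),
      l.foldl (fun acc i => if P i then acc + 1 else acc) init
        = init + ((l.countP (fun i => decide (P i))) : Int) := by
  intro l
  induction l with
  | nil => simp
  | cons x xs ih =>
    intro init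
    simp only [List.foldl_cons, List.countP_cons, ih]
    by_cases h : P x <;> simp [h] <;> push_cast <;> ring

lemma pvQ_succ (prev : Bool) (c : Char) (cs : List Char) (k : Nat) :
    pvQ prev (c :: cs) (k + 1) = pvQ (c != '-') cs k := by
  cases k with
  | zero =>
    have h : (0 + 1 + 2 < cs.length + 1) = (0 + 2 < cs.length) := by
      apply propext; omega
    by_cases hc : c = '-'
    · simp [pvQ, hc, h, bne]
    · have hb : (c == '-') = false := by simp [hc]
      simp [pvQ, hc, h, bne, hb]
  | succ j =>
    have h : (j + 1 + 1 + 2 < cs.length + 1) = (j + 1 + 2 < cs.length) := by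
      apply propext; omega
    simp only [pvQ, List.getD_cons_succ, List.length_cons, h]
    simp

lemma pvQ_zero (prev : Bool) (c : Char) (cs : List Char) :
    pvQ prev (c :: cs) 0 = (prev && (c == '-') && pvMhead cs) := by
  cases cs with
  | nil => simp [pvQ, pvMhead]
  | cons a t =>
    cases t with
    | nil => simp [pvQ, pvMhead]
    | cons d t' =>
      simp only [pvQ, pvMhead, List.getD_cons_zero, List.getD_cons_succ, List.length_cons]
      have h2 : 0 + 2 < t'.length + 1 + 1 + 1 := by omega
      by_cases hp : prev <;> by_cases hc : c = '-' <;> by_cases ha : a = '-' <;>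
        by_cases hd : d = '-' <;> simp [hp, hc, ha, hd, h2]

lemma pvCountQ : ∀ (cs : List Char) (prev : Bool),
    ((List.range cs.length).countP (pvQ prev cs) : Int) = pvCnt prev cs := by
  intro cs
  induction cs with
  | nil => intro prev; simp [pvCnt]
  | cons c t ih =>
    intro prev
    have hm : (List.range (t.length + 1)) = 0 :: (List.range t.length).map Nat.succ :=
      List.range_succ_eq_map (n := t.length)
    simp only [List.length_cons, hm, List.countP_cons, List.countP_map]
    have hsh : ∀ k ∈ List.range t.length,
        (pvQ prev (c :: t) ∘ Nat.succ) k = pvQ (c != '-') t k := by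
      intro k _; exact pvQ_succ prev c t k
    rw [List.countP_congr (fun k hk => by rw [hsh k hk])]
    simp only [pvCnt, ← ih (c != '-')]
    rw [pvQ_zero]
    cases hcond : (prev && (c == '-') && pvMhead t) <;> simp [hcond] <;> push_cast <;> ring

-- the A-side condition at an in-range cast index equals pvQ false
lemma pvAcond_eq (cs : List Char) (k : Nat) (hk : k < cs.length) :
    (decide ((k : Int) ≠ 0 ∧ PySem.List.pyGet? cs (k : Int) = some '-' ∧ (k : Int) + 2 < (cs.length : Int) ∧
       PySem.List.pyGet? cs ((k : Int) + 1) = some '-' ∧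
       ¬ (PySem.List.pyGet? cs ((k : Int) + 2) = some '-') ∧
       ¬ (PySem.List.pyGet? cs ((k : Int) - 1) = some '-'))) = pvQ false cs k := by
  cases k with
  | zero => simp [pvQ]
  | succ j =>
    have e1 : ((j + 1 : Nat) : Int) + 1 = ((j + 2 : Nat) : Int) := by push_cast; ring
    have e2 : ((j + 1 : Nat) : Int) + 2 = ((j + 3 : Nat) : Int) := by push_cast; ring
    have e3 : ((j + 1 : Nat) : Int) - 1 = ((j : Nat) : Int) := by push_cast; ring
    rw [e1, e2, e3]
    simp only [PySem.List.pyGet?_natCast]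
    by_cases hlen : j + 1 + 2 < cs.length
    · have g0 : cs[j + 1]? = some cs[j + 1] := List.getElem?_eq_getElem (by omega)
      have g1 : cs[j + 2]? = some cs[j + 2] := List.getElem?_eq_getElem (by omega)
      have g2 : cs[j + 3]? = some cs[j + 3] := List.getElem?_eq_getElem (by omega)
      have g3 : cs[j]? = some cs[j] := List.getElem?_eq_getElem (by omega)
      have d0 : cs.getD (j + 1) ' ' = cs[j + 1] := List.getD_eq_getElem cs ' ' (by omega)
      have d1 : cs.getD (j + 1 + 1) ' ' = cs[j + 2] := List.getD_eq_getElem cs ' ' (by omega)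
      have d2 : cs.getD (j + 1 + 2) ' ' = cs[j + 3] := List.getD_eq_getElem cs ' ' (by omega)
      have d3 : cs.getD (j + 1 - 1) ' ' = cs[j] := List.getD_eq_getElem cs ' ' (by omega)
      have hlen' : ((j + 1 : Nat) : Int) + 2 < (cs.length : Int) := by push_cast; omega
      rw [e2] at hlen'
      simp only [pvQ, g0, g1, g2, g3, d0, d1, d2, d3]
      by_cases h1 : cs[j + 1] = '-' <;> by_cases h2 : cs[j + 2] = '-' <;>
        by_cases h3 : cs[j + 3] = '-' <;> by_cases h4 : cs[j] = '-' <;>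
          simp [h1, h2, h3, h4, hlen, hlen'] <;> omega
    · have hq : pvQ false cs (j + 1) = false := by
        have hd : decide (j + 1 + 2 < cs.length) = false := by simpa using hlen
        simp [pvQ, hd]
      rw [hq, decide_eq_false_iff_not]
      rintro ⟨-, -, h3, -⟩
      push_cast at h3
      omega

lemma pvA_eq_cnt (line : String) :
    check_line_valid line = (if pvCnt false line.toList = 2 then true else false) := by
  simp only [check_line_valid]
  generalize line.toList = cs
  rw [PySem.List.pyRange_one]
  have hn : (((cs.length : Int) - 0)).toNat = cs.length := by omega
  rw [hn]
  rw [pvFoldCount (fun i => i ≠ 0 ∧ PySem.List.pyGet? cs i = some '-' ∧ i + 2 < (cs.length : Int) ∧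
       PySem.List.pyGet? cs (i + 1) = some '-' ∧
       ¬ (PySem.List.pyGet? cs (i + 2) = some '-') ∧
       ¬ (PySem.List.pyGet? cs (i - 1) = some '-'))]
  rw [List.countP_map]
  have hcong : ∀ k ∈ List.range cs.length,
      ((fun i => decide (i ≠ 0 ∧ PySem.List.pyGet? cs i = some '-' ∧ i + 2 < (cs.length : Int) ∧
       PySem.List.pyGet? cs (i + 1) = some '-' ∧
       ¬ (PySem.List.pyGet? cs (i + 2) = some '-') ∧
       ¬ (PySem.List.pyGet? cs (i - 1) = some '-'))) ∘ (fun k : Nat => (0 : Int) + (k : Int))) k = pvQ false cs k := by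
    intro k hk
    rw [List.mem_range] at hk
    simp only [Function.comp, zero_add]
    exact pvAcond_eq cs k hk
  rw [List.countP_congr (fun k hk => by rw [hcong k hk]), pvCountQ]
  simp

lemma pvB_fold : ∀ (cs : List Char) (count run : Int) (seen : Bool),
    (cs.foldl (fun (st : Int × Int × Bool) ch =>
      let (count, run, seen) := st
      if ch == '-' then (count, run + 1, seen)
      else ((if run == 2 && seen then count + 1 else count), 0, true)) (count, run, seen)).1
      = count + pvF run seen cs := by
  intro cs
  induction cs with
  | nil => intro count run seen; simp [pvF]
  | cons c t ih =>
    intro count run seen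
    simp only [List.foldl_cons, pvF]
    by_cases hc : c = '-'
    · simp only [hc]
      simpa using ih count (run + 1) seen
    · have hc' : (c == '-') = false := by simp [hc]
      simp only [hc']
      by_cases hr : run == 2 && seen <;> simp only [hr, if_true, if_false] <;>
        rw [ih] <;> simp [pvF] <;> ring

-- the bridge: pvF from the initial and near-initial states equals pvCnt
lemma pvF_pack : ∀ (cs : List Char) (seen : Bool),
    (pvF 0 seen cs = pvCnt seen cs) ∧
    (pvF 1 seen cs = pvCnt seen ('-' :: cs)) ∧
    (pvF 2 seen cs = (if seen && pvMhead ('-' :: cs) then 1 else 0) + pvCnt false cs) ∧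
    (∀ k : Int, 3 ≤ k → pvF k seen cs = pvCnt false cs) := by
  intro cs
  induction cs with
  | nil =>
    intro seen
    refine ⟨by simp [pvF, pvCnt], by simp [pvF, pvCnt, pvMhead], ?_, ?_⟩
    · simp [pvF, pvCnt, pvMhead]
    · intro k hk; simp [pvF, pvCnt]
  | cons c t ih =>
    intro seen
    by_cases hc : c = '-'
    · subst hc
      refine ⟨?_, ?_, ?_, ?_⟩
      · -- pvF 0 seen ('-'::t) = pvCnt seen ('-'::t)
        simp only [pvF, if_pos (by simp : (('-' : Char) == '-') = true)]
        exact (ih seen).2.1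
      · -- pvF 1 seen ('-'::t) = pvCnt seen ('-'::'-'::t)
        simp only [pvF, if_pos (by simp : (('-' : Char) == '-') = true)]
        rw [show (1 : Int) + 1 = 2 by norm_num, (ih seen).2.2.1]
        cases t with
        | nil => simp [pvCnt, pvMhead]
        | cons d t' => by_cases hd : d = '-' <;> simp [pvCnt, pvMhead, hd]
      · -- pvF 2 seen ('-'::t)
        simp only [pvF, if_pos (by simp : (('-' : Char) == '-') = true)]
        rw [show (2 : Int) + 1 = 3 by norm_num, (ih seen).2.2.2 3 (by norm_num)]
        simp only [pvMhead]
        cases t with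
        | nil => simp [pvCnt, pvMhead]
        | cons d t' =>
          simp only [pvCnt]
          by_cases hd : d = '-' <;> simp [pvMhead, hd, pvCnt]
      · intro k hk
        simp only [pvF, if_pos (by simp : (('-' : Char) == '-') = true)]
        rw [(ih seen).2.2.2 (k + 1) (by omega)]
        simp [pvCnt]
    · have hc' : (c == '-') = false := by simp [hc]
      have hcne : (c != '-') = true := by simp [hc]
      refine ⟨?_, ?_, ?_, ?_⟩
      · simp only [pvF, hc']
        rw [(ih true).1]
        have : ((0 : Int) == 2 && seen) = false := by simp
        simp [this, pvCnt, hc', hcne]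
      · simp only [pvF, hc']
        rw [(ih true).1]
        have : ((1 : Int) == 2 && seen) = false := by simp
        cases t <;> simp [this, pvCnt, pvMhead, hc', hcne, hc]
      · simp only [pvF, hc']
        rw [(ih true).1]
        have h2 : ((2 : Int) == 2 && seen) = (seen) := by simp
        simp only [h2, pvCnt, pvMhead, hc', hcne]
        by_cases hs : seen <;> simp [hs]
      · intro k hk
        simp only [pvF, hc']
        rw [(ih true).1]
        have : (k == 2 && seen) = false := by
          have : (k == 2) = false := by simp; omega
          simp [this]
        simp [this, pvCnt, hcne]

lemma pvB_eq_cnt (line : String) :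
    check_line_valid_alt line = (if pvCnt false line.toList = 2 then true else false) := by
  simp only [check_line_valid_alt]
  rw [pvB_fold line.toList 0 0 false, (pvF_pack line.toList false).1]
  simp only [zero_add]
  by_cases h : pvCnt false line.toList = 2 <;> simp [h]

-- ===== VERDICT (by name: the statement is the Claim_ definition above) =====
theorem check_line_valid_spec : Claim_equal_check_line_valid := by
  intro line _
  show check_line_valid line = check_line_valid_alt line
  rw [pvA_eq_cnt, pvB_eq_cnt]
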